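-- pv_equiv track=rewrite | github.com/shuuji3/leetcode | 1292.maximum-side-length-of-a-square-with-sum-less-than-or-equal-to-threshold.286043444.notac.py | maxSideLength
-- ===== SOURCE A (Python) =====
-- from typing import List
--
-- def maxSideLength(mat: List[List[int]], threshold: int) -> int:
--     rows, cols = len(mat), len(mat[0])
--     max_size = max(rows, cols)
--     max_side_length = 0
--
--     for i in reversed(range(max_size)):
--         size = i+1
--         for start_row in range(rows):
--             if start_row + size > rows:
--                 break
--             for start_col in range(cols):
--                 if start_col + size > cols:
--                     break
--                 sum_of_square = 0
--                 for row in range(size):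
--                     mat_row = mat[start_row + row]
--                     for col in range(size):
--                         sum_of_square += mat_row[start_col + col]
--                 if sum_of_square <= threshold:
--                     return size
--     return 0
-- ===== SOURCE B (Python) =====
-- from typing import List
--
-- def maxSideLength(mat: List[List[int]], threshold: int) -> int:
--     rows, cols = len(mat), len(mat[0])
--     # 2D prefix sums: P[r][c] = sum of mat[i][j] for i < r, j < c
--     P = [[0] * (cols + 1)]
--     prev = P[0]
--     for row in mat:
--         cur = [0]
--         s = 0
--         for c in range(cols):
--             s += row[c]
--             cur.append(prev[c + 1] + s)
--         P.append(cur)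
--         prev = cur
--     # entries may be negative, so feasibility is not monotone in the side
--     # length: scan sides from largest to smallest, O(1) per square.
--     for size in range(min(rows, cols), 0, -1):
--         for r in range(rows - size + 1):
--             for c in range(cols - size + 1):
--                 if P[r + size][c + size] - P[r][c + size] - P[r + size][c] + P[r][c] <= threshold:
--                     return size
--     return 0
-- ===== Notes on version B (the rewrite author's own statement) =====
-- stated objective: alternative
-- what changed: Replaces A's per-square rescan (the two inner size*size summation loops) by a 2D prefix-sum table built once, so each candidate square is tested with four table lookups; sides are still scanned largest-first because entries may be negative, making feasibility non-monotone in the side length.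
-- outside the precondition, e.g. on maxSideLength([[1, 2, 3], [4, 5]], 12): A returns 2, B raises IndexError
import Mathlib
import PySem

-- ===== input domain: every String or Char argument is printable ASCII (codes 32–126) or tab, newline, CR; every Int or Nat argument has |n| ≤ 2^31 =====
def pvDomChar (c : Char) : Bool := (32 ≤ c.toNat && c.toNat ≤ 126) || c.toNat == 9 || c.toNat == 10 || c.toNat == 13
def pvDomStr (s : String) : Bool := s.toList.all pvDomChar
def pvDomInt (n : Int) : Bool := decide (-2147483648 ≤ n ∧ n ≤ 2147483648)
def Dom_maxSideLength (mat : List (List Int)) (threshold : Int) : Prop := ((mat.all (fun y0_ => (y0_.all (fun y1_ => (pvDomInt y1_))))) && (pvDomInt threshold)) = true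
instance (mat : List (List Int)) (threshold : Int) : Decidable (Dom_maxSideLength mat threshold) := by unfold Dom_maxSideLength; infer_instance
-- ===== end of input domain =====

-- B replaces A's per-square rescan (the two inner summation loops) by a 2D prefix-sum
-- table built once, so each candidate square is tested with four table lookups; sides are
-- still scanned largest-first because entries may be negative, making feasibility
-- non-monotone in the side length.  Objective: alternative algorithm, same return value.

-- ===== PORT A =====
-- sum_of_square accumulation: the two inner 'for row/col in range(size)' loops of A.
-- Indices here are sums of Nats, hence nonnegative; List.getD equals Python's mat[i][j]
-- on in-range indices, and Pre_ excludes the inputs where Python would raise IndexError.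
def pySquareSum (mat : List (List Int)) (sr sc size : Nat) : Int :=
  (List.range size).foldl (fun acc row =>
    let matRow := mat.getD (sr + row) []
    (List.range size).foldl (fun a col => a + matRow.getD (sc + col) 0) acc) 0

-- 'for start_col in range(cols)' with its break and early return
def colLoopA (mat : List (List Int)) (threshold : Int) (size cols sr : Nat) :
    List Nat → Option Int
  | [] => none
  | sc :: rest =>
    if cols < sc + size then none
    else if pySquareSum mat sr sc size ≤ threshold then some (size : Int)
    else colLoopA mat threshold size cols sr rest

-- 'for start_row in range(rows)' with its break
def rowLoopA (mat : List (List Int)) (threshold : Int) (size rows cols : Nat) :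
    List Nat → Option Int
  | [] => none
  | sr :: rest =>
    if rows < sr + size then none
    else match colLoopA mat threshold size cols sr (List.range cols) with
      | some v => some v
      | none => rowLoopA mat threshold size rows cols rest

-- 'for i in reversed(range(max_size))', size = i+1
def sizeLoopA (mat : List (List Int)) (threshold : Int) (rows cols : Nat) :
    List Nat → Option Int
  | [] => none
  | i :: rest =>
    match rowLoopA mat threshold (i + 1) rows cols (List.range rows) with
    | some v => some v
    | none => sizeLoopA mat threshold rows cols rest

def maxSideLength (mat : List (List Int)) (threshold : Int) : Int :=
  let rows := mat.length
  let cols := (mat.headD []).length  -- mat[0]; Pre_ excludes the empty mat where Python raises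
  let maxSize := max rows cols
  (sizeLoopA mat threshold rows cols (List.range maxSize).reverse).getD 0

-- ===== PORT B =====
-- one row of the prefix table: cur = [0]; for c in range(cols): s += row[c]; cur.append(prev[c+1]+s)
def buildPrefixRow (prev row : List Int) (cols : Nat) : List Int :=
  ((List.range cols).foldl (fun (st : List Int × Int) c =>
    let s := st.2 + row.getD c 0
    (st.1 ++ [prev.getD (c + 1) 0 + s], s)) ([0], 0)).1

-- P = [[0]*(cols+1)]; prev = P[0]; for row in mat: … append cur; prev = cur
def buildP (mat : List (List Int)) (cols : Nat) : List (List Int) :=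
  let z := List.replicate (cols + 1) (0 : Int)
  (mat.foldl (fun (st : List (List Int) × List Int) row =>
    let cur := buildPrefixRow st.2 row cols
    (st.1 ++ [cur], cur)) ([z], z)).1

-- 'for c in range(cols - size + 1)' with the O(1) prefix-sum test
def altColLoopB (P : List (List Int)) (threshold : Int) (size r : Nat) :
    List Nat → Option Int
  | [] => none
  | c :: rest =>
    if (P.getD (r + size) []).getD (c + size) 0 - (P.getD r []).getD (c + size) 0
        - (P.getD (r + size) []).getD c 0 + (P.getD r []).getD c 0 ≤ threshold then
      some (size : Int)
    else altColLoopB P threshold size r rest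

-- 'for r in range(rows - size + 1)'
def altRowLoopB (P : List (List Int)) (threshold : Int) (size cols : Nat) :
    List Nat → Option Int
  | [] => none
  | r :: rest =>
    match altColLoopB P threshold size r (List.range (cols - size + 1)) with
    | some v => some v
    | none => altRowLoopB P threshold size cols rest

-- 'for size in range(min(rows, cols), 0, -1)'
def altSizeLoopB (P : List (List Int)) (threshold : Int) (rows cols : Nat) :
    Nat → Option Int
  | 0 => none
  | s + 1 =>
    match altRowLoopB P threshold (s + 1) cols (List.range (rows - (s + 1) + 1)) with
    | some v => some v
    | none => altSizeLoopB P threshold rows cols s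

def maxSideLength_alt (mat : List (List Int)) (threshold : Int) : Int :=
  let rows := mat.length
  let cols := (mat.headD []).length
  let P := buildP mat cols
  (altSizeLoopB P threshold rows cols (min rows cols)).getD 0

-- ===== PRECONDITION & SPEC =====
-- Pre_ excludes the empty matrix (A raises IndexError on mat[0]) and ragged matrices with a
-- row shorter than the first one: there A usually raises IndexError and returns only
-- accidentally when an early square qualifies before a short row is indexed, and B's
-- prefix-sum pass naturally raises IndexError on any short row.
def Pre_maxSideLength (mat : List (List Int)) (threshold : Int) : Prop :=
  mat ≠ [] ∧ ∀ row ∈ mat, (mat.headD []).length ≤ row.length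
instance (mat : List (List Int)) (threshold : Int) : Decidable (Pre_maxSideLength mat threshold) := by
  unfold Pre_maxSideLength; infer_instance

def pvWitness_maxSideLength : List (List Int) × Int := ([[1, 2], [3, 4]], 4)

def Spec_maxSideLength (mat : List (List Int)) (threshold : Int) (out : Int) : Prop := out = maxSideLength_alt mat threshold
instance (mat : List (List Int)) (threshold : Int) (out : Int) : Decidable (Spec_maxSideLength mat threshold out) := by unfold Spec_maxSideLength; infer_instance

-- ===== CLAIM (what is proved, stated in full; the proofs are below) =====
def Claim_equal_maxSideLength : Prop := ∀ (mat : List (List Int)) (threshold : Int), Dom_maxSideLength mat threshold → Pre_maxSideLength mat threshold → Spec_maxSideLength mat threshold (maxSideLength mat threshold)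

-- ===== LEMMAS AND PROOFS =====

-- rp row j = row[0] + … + row[j-1] (via getD, as the ports read rows)
def rp (row : List Int) : Nat → Int
  | 0 => 0
  | j + 1 => rp row j + row.getD j 0

-- PP mat c r = sum of rp over the first r rows at column bound c (the 2D prefix sum)
def PP (mat : List (List Int)) (c : Nat) : Nat → Int
  | 0 => 0
  | r + 1 => PP mat c r + rp (mat.getD r []) c

lemma buildPrefixRow_map (row : List Int) (cols : Nat) (f : Nat → Int) (hf : f 0 = 0) :
    buildPrefixRow ((List.range (cols + 1)).map f) row cols
      = (List.range (cols + 1)).map (fun c => f c + rp row c) := by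
  have hprev : ∀ j, j < cols + 1 → ((List.range (cols + 1)).map f).getD j 0 = f j :=
    fun j hj => PySem.List.getD_map_range f (cols + 1) j 0 hj
  generalize hP : (List.range (cols + 1)).map f = prevL at hprev ⊢
  have key : ∀ k, k ≤ cols →
      (List.range k).foldl (fun (st : List Int × Int) c =>
        let s := st.2 + row.getD c 0
        (st.1 ++ [prevL.getD (c + 1) 0 + s], s)) ([0], 0)
      = ((List.range (k + 1)).map (fun c => f c + rp row c), rp row k) := by
    intro k
    induction k with
    | zero => intro _; simp [rp, hf]
    | succ k ih =>
      intro hk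
      rw [List.range_succ, List.foldl_append, ih (Nat.le_of_succ_le hk)]
      simp only [List.foldl_cons, List.foldl_nil]
      rw [hprev (k + 1) (by omega), List.range_succ (n := k + 1), List.map_append]
      simp [rp]
  simp only [buildPrefixRow]
  rw [key cols le_rfl]

-- goP: the tail of the prefix table built from successive rows, threading the previous row f
def goP (cols : Nat) : (Nat → Int) → List (List Int) → List (List Int)
  | _, [] => []
  | f, row :: rest =>
    ((List.range (cols + 1)).map (fun c => f c + rp row c))
      :: goP cols (fun c => f c + rp row c) rest

lemma fold_goP (cols : Nat) :
    ∀ (l : List (List Int)) (acc : List (List Int)) (f : Nat → Int), f 0 = 0 →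
      (l.foldl (fun (st : List (List Int) × List Int) row =>
          (st.1 ++ [buildPrefixRow st.2 row cols], buildPrefixRow st.2 row cols))
          (acc, (List.range (cols + 1)).map f)).1
        = acc ++ goP cols f l := by
  intro l
  induction l with
  | nil => intro acc f hf; simp [goP]
  | cons row rest ih =>
    intro acc f hf
    simp only [List.foldl_cons]
    rw [buildPrefixRow_map row cols f hf]
    have hg : (fun c => f c + rp row c) 0 = 0 := by simp [rp, hf]
    rw [ih (acc ++ [(List.range (cols + 1)).map fun c => f c + rp row c]) _ hg]
    simp [goP, List.append_assoc]

lemma PP_cons (row : List Int) (rest : List (List Int)) (c : Nat) :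
    ∀ k, PP (row :: rest) c (k + 1) = rp row c + PP rest c k := by
  intro k
  induction k with
  | zero => simp [PP]
  | succ k ih =>
    show PP (row :: rest) c (k + 1) + rp ((row :: rest).getD (k + 1) []) c = _
    rw [ih, List.getD_cons_succ]
    show _ = rp row c + (PP rest c k + rp (rest.getD k []) c)
    ring

lemma goP_getD (cols : Nat) :
    ∀ (l : List (List Int)) (f : Nat → Int) (r c : Nat), r < l.length → c ≤ cols →
      ((goP cols f l).getD r []).getD c 0 = f c + PP l c (r + 1) := by
  intro l
  induction l with
  | nil => intro f r c hr; simp at hr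
  | cons row rest ih =>
    intro f r c hr hc
    cases r with
    | zero =>
      simp only [goP, List.getD_cons_zero]
      rw [PySem.List.getD_map_range _ (cols + 1) c 0 (by omega), PP_cons]
      simp [PP]
    | succ r =>
      simp only [goP, List.getD_cons_succ]
      rw [ih _ r c (by simpa using hr) hc, PP_cons]
      ring

lemma buildP_lookup (mat : List (List Int)) (cols : Nat) (r c : Nat)
    (hr : r ≤ mat.length) (hc : c ≤ cols) :
    ((buildP mat cols).getD r []).getD c 0 = PP mat c r := by
  have hz : List.replicate (cols + 1) (0 : Int) = (List.range (cols + 1)).map (fun _ => (0 : Int)) := by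
    simp
  simp only [buildP]
  rw [hz, fold_goP cols mat [(List.range (cols + 1)).map (fun _ => (0 : Int))]
        (fun _ => (0 : Int)) rfl]
  cases r with
  | zero =>
    simp only [List.singleton_append, List.getD_cons_zero]
    rw [PySem.List.getD_map_range _ (cols + 1) c 0 (by omega)]
    simp [PP]
  | succ r =>
    simp only [List.singleton_append, List.getD_cons_succ]
    rw [goP_getD cols mat _ r c (by omega) hc]
    simp

lemma innerFoldSum (row : List Int) (sc : Nat) :
    ∀ (size : Nat) (a : Int),
      (List.range size).foldl (fun x col => x + row.getD (sc + col) 0) a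
        = a + (rp row (sc + size) - rp row sc) := by
  intro size
  induction size with
  | zero => intro a; simp
  | succ k ih =>
    intro a
    rw [List.range_succ, List.foldl_append, ih a]
    show a + (rp row (sc + k) - rp row sc) + row.getD (sc + k) 0 = _
    have : rp row (sc + (k + 1)) = rp row (sc + k) + row.getD (sc + k) 0 := rfl
    rw [this]; ring

lemma PP_sub (mat : List (List Int)) (c sr : Nat) :
    ∀ size, PP mat c (sr + size) - PP mat c sr
      = ((List.range size).map (fun row => rp (mat.getD (sr + row) []) c)).sum := by
  intro size
  induction size with
  | zero => simp
  | succ k ih =>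
    rw [List.range_succ, List.map_append, List.sum_append, ← ih]
    have : PP mat c (sr + (k + 1)) = PP mat c (sr + k) + rp (mat.getD (sr + k) []) c := rfl
    rw [this]; simp; ring

lemma sum_map_sub (f g : Nat → Int) :
    ∀ l : List Nat, (l.map (fun x => f x - g x)).sum = (l.map f).sum - (l.map g).sum := by
  intro l
  induction l with
  | nil => simp
  | cons x rest ih => simp [ih]; ring

lemma pySquareSum_eq (mat : List (List Int)) (sr sc size : Nat) :
    pySquareSum mat sr sc size
      = PP mat (sc + size) (sr + size) - PP mat (sc + size) sr
        - PP mat sc (sr + size) + PP mat sc sr := by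
  simp only [pySquareSum]
  rw [PySem.List.foldl_congr_mem (List.range size) _
      (fun acc row => acc + (rp (mat.getD (sr + row) []) (sc + size) - rp (mat.getD (sr + row) []) sc)) 0
      (by intro acc x hx; exact innerFoldSum (mat.getD (sr + x) []) sc size acc)]
  rw [PySem.List.foldl_add]
  rw [sum_map_sub]
  rw [← PP_sub mat (sc + size) sr size, ← PP_sub mat sc sr size]
  ring

-- the break-free column loop A reduces to once the break is cut off
def colCore (mat : List (List Int)) (threshold : Int) (size sr : Nat) :
    List Nat → Option Int
  | [] => none
  | sc :: rest =>
    if pySquareSum mat sr sc size ≤ threshold then some (size : Int)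
    else colCore mat threshold size sr rest

def rowCore (mat : List (List Int)) (threshold : Int) (size cols : Nat) :
    List Nat → Option Int
  | [] => none
  | sr :: rest =>
    match colLoopA mat threshold size cols sr (List.range cols) with
    | some v => some v
    | none => rowCore mat threshold size cols rest

lemma takeWhile_nil_of_false {p : Nat → Bool} (l : List Nat) (h : ∀ x ∈ l, p x = false) :
    l.takeWhile p = [] := by
  cases l with
  | nil => rfl
  | cons a rest => rw [List.takeWhile_cons, h a (by simp)]; rfl

lemma colLoopA_eq_takeWhile (mat : List (List Int)) (threshold : Int) (size cols sr : Nat) :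
    ∀ l, colLoopA mat threshold size cols sr l
      = colCore mat threshold size sr (l.takeWhile fun sc => decide (sc + size ≤ cols)) := by
  intro l
  induction l with
  | nil => rfl
  | cons sc rest ih =>
    rw [List.takeWhile_cons]
    by_cases h : cols < sc + size
    · have h' : ¬ (decide (sc + size ≤ cols) = true) := by simp; omega
      rw [if_neg h']
      simp only [colLoopA]
      rw [if_pos h]
      rfl
    · have h' : sc + size ≤ cols := by omega
      simp only [colLoopA, colCore, h', decide_true, reduceIte, if_neg h]
      rw [ih]

lemma rowLoopA_eq_takeWhile (mat : List (List Int)) (threshold : Int) (size rows cols : Nat) :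
    ∀ l, rowLoopA mat threshold size rows cols l
      = rowCore mat threshold size cols (l.takeWhile fun sr => decide (sr + size ≤ rows)) := by
  intro l
  induction l with
  | nil => rfl
  | cons sr rest ih =>
    rw [List.takeWhile_cons]
    by_cases h : rows < sr + size
    · have h' : ¬ (decide (sr + size ≤ rows) = true) := by simp; omega
      rw [if_neg h']
      simp only [rowLoopA]
      rw [if_pos h]
      rfl
    · have h' : sr + size ≤ rows := by omega
      simp only [rowLoopA, rowCore, h', decide_true, reduceIte, if_neg h]
      rw [ih]

lemma takeWhile_range (n size : Nat) (h1 : 1 ≤ size) :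
    (List.range n).takeWhile (fun x => decide (x + size ≤ n)) = List.range (n + 1 - size) := by
  by_cases hn : size ≤ n
  · have key : List.range n
        = List.range (n + 1 - size) ++ (List.range (size - 1)).map (fun i => (n + 1 - size) + i) := by
      rw [← List.range_add]; congr 1; omega
    rw [key, List.takeWhile_append]
    have hall : (List.range (n + 1 - size)).takeWhile (fun x => decide (x + size ≤ n))
        = List.range (n + 1 - size) := by
      refine List.takeWhile_eq_self_iff.mpr ?_
      intro x hx
      simp only [List.mem_range] at hx
      simp; omega
    rw [hall, if_pos rfl]
    have hnil : ((List.range (size - 1)).map (fun i => (n + 1 - size) + i)).takeWhile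
        (fun x => decide (x + size ≤ n)) = [] := by
      refine takeWhile_nil_of_false _ ?_
      intro x hx
      simp only [List.mem_map, List.mem_range] at hx
      obtain ⟨i, hi, rfl⟩ := hx
      simp; omega
    rw [hnil, List.append_nil]
  · have h0 : n + 1 - size = 0 := by omega
    rw [h0]
    refine takeWhile_nil_of_false _ ?_
    intro x hx
    simp only [List.mem_range] at hx
    simp; omega

lemma col_eq (mat : List (List Int)) (threshold : Int) (size sr cols : Nat)
    (hr : sr + size ≤ mat.length) :
    ∀ l, (∀ sc ∈ l, sc + size ≤ cols) →
      colCore mat threshold size sr l = altColLoopB (buildP mat cols) threshold size sr l := by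
  intro l
  induction l with
  | nil => intro _; rfl
  | cons c rest ih =>
    intro hall
    have hc : c + size ≤ cols := hall c (by simp)
    simp only [colCore, altColLoopB]
    rw [buildP_lookup mat cols (sr + size) (c + size) hr (by omega),
        buildP_lookup mat cols sr (c + size) (by omega) (by omega),
        buildP_lookup mat cols (sr + size) c hr (by omega),
        buildP_lookup mat cols sr c (by omega) (by omega),
        pySquareSum_eq]
    rw [ih (fun x hx => hall x (by simp [hx]))]

lemma row_eq (mat : List (List Int)) (threshold : Int) (size cols : Nat)
    (h1 : 1 ≤ size) (hc : size ≤ cols) :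
    ∀ l, (∀ sr ∈ l, sr + size ≤ mat.length) →
      rowCore mat threshold size cols l
        = altRowLoopB (buildP mat cols) threshold size cols l := by
  intro l
  induction l with
  | nil => intro _; rfl
  | cons sr rest ih =>
    intro hall
    have hsr : sr + size ≤ mat.length := hall sr (by simp)
    simp only [rowCore, altRowLoopB]
    rw [colLoopA_eq_takeWhile, takeWhile_range cols size h1,
        col_eq mat threshold size sr cols hsr (List.range (cols + 1 - size))
          (fun sc hsc => by simp only [List.mem_range] at hsc; omega),
        show cols + 1 - size = cols - size + 1 by omega,
        ih (fun x hx => hall x (by simp [hx]))]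

lemma rowLoopA_none_of_big (mat : List (List Int)) (threshold : Int) (size rows cols : Nat)
    (hrows : rows = mat.length) (hbig : min rows cols < size) :
    rowLoopA mat threshold size rows cols (List.range rows) = none := by
  rw [rowLoopA_eq_takeWhile]
  by_cases hr : rows < size
  · have : (List.range rows).takeWhile (fun sr => decide (sr + size ≤ rows)) = [] := by
      refine takeWhile_nil_of_false _ ?_
      intro x hx
      simp only [List.mem_range] at hx
      simp; omega
    rw [this]; rfl
  · have hcols : cols < size := by omega
    have hTW : (List.range cols).takeWhile (fun sc => decide (sc + size ≤ cols)) = [] := by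
      refine takeWhile_nil_of_false _ ?_
      intro x hx
      simp only [List.mem_range] at hx
      simp; omega
    have hnone : ∀ l, rowCore mat threshold size cols l = none := by
      intro l
      induction l with
      | nil => rfl
      | cons sr rest ih =>
        simp only [rowCore, colLoopA_eq_takeWhile, hTW]
        exact ih
    exact hnone _

lemma size_bridge (mat : List (List Int)) (threshold : Int) (cols : Nat) :
    ∀ n, sizeLoopA mat threshold mat.length cols (List.range n).reverse
      = altSizeLoopB (buildP mat cols) threshold mat.length cols (min n (min mat.length cols)) := by
  intro n
  induction n with
  | zero => rfl
  | succ n ih =>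
    have hrev : (List.range (n + 1)).reverse = n :: (List.range n).reverse := by
      rw [List.range_succ, List.reverse_append]; rfl
    rw [hrev]
    by_cases hle : n + 1 ≤ min mat.length cols
    · have h1 : (1 : Nat) ≤ n + 1 := by omega
      have hrows : n + 1 ≤ mat.length := by omega
      have hcols : n + 1 ≤ cols := by omega
      have hmin1 : min (n + 1) (min mat.length cols) = n + 1 := by omega
      have hmin2 : min n (min mat.length cols) = n := by omega
      rw [hmin1] at *
      simp only [sizeLoopA, altSizeLoopB]
      rw [rowLoopA_eq_takeWhile, takeWhile_range mat.length (n + 1) h1,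
          row_eq mat threshold (n + 1) cols h1 hcols (List.range (mat.length + 1 - (n + 1)))
            (fun sr hsr => by simp only [List.mem_range] at hsr; omega),
          show mat.length + 1 - (n + 1) = mat.length - (n + 1) + 1 by omega]
      cases altRowLoopB (buildP mat cols) threshold (n + 1) cols
          (List.range (mat.length - (n + 1) + 1)) with
      | some v => rfl
      | none => rw [ih, hmin2]
    · have hbig : min mat.length cols < n + 1 := by omega
      have hmin : min (n + 1) (min mat.length cols) = min n (min mat.length cols) := by omega
      simp only [sizeLoopA]
      rw [rowLoopA_none_of_big mat threshold (n + 1) mat.length cols rfl hbig, hmin, ih]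

-- ===== VERDICT (by name: the statement is the Claim_ definition above) =====
theorem maxSideLength_spec : Claim_equal_maxSideLength := by
  intro mat threshold _ _
  show maxSideLength mat threshold = maxSideLength_alt mat threshold
  simp only [maxSideLength, maxSideLength_alt]
  rw [size_bridge mat threshold (mat.headD []).length (max mat.length (mat.headD []).length),
      show min (max mat.length (mat.headD []).length) (min mat.length (mat.headD []).length)
        = min mat.length (mat.headD []).length from by omega]
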